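-- pv_equiv track=rewrite | github.com/MrBrantCode/unitest_baseline | mut_generate/mist_train_taco/taco_7276/solution.py | find_polycarp_numbers
-- ===== SOURCE A (Python) =====
-- def find_polycarp_numbers(t: int, k_list: list) -> list:
--     """
--     Finds the k-th element in the sequence of numbers that Polycarp likes.
--
--     Parameters:
--     t (int): The number of test cases.
--     k_list (list): A list of integers where each integer represents the position k in the sequence.
--
--     Returns:
--     list: A list of integers where each integer is the k-th element of the sequence for each test case.
--     """
--     arr = []
--     i = 1
--     while len(arr) <= max(k_list):
--         if i % 3 != 0 and i % 10 != 3: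
--             arr.append(i)
--         i += 1
--
--     result = [arr[k - 1] for k in k_list]
--     return result
-- ===== SOURCE B (Python) =====
-- # The numbers not divisible by 3 and not ending in 3 repeat with period 30 (18 per period),
-- # so the first n of them are generated directly by a closed form instead of filtering.
-- _TABLE = [1, 2, 4, 5, 7, 8, 10, 11, 14, 16, 17, 19, 20, 22, 25, 26, 28, 29]
--
-- def find_polycarp_numbers(t: int, k_list: list) -> list:
--     n = max(k_list) + 1
--     arr = [30 * (j // 18) + _TABLE[j % 18] for j in range(n)]
--     return [arr[k - 1] for k in k_list]
-- ===== Notes on version B (the rewrite author's own statement) =====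
-- stated objective: alternative
-- what changed: A fills the list by a while loop that tests every candidate integer for divisibility by 3 and for a trailing 3; B generates the same first max(k_list)+1 liked numbers directly by the period-30 closed form 30*(j//18) + table[j%18] (no candidate testing) and then indexes it the same way.
import Mathlib
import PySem

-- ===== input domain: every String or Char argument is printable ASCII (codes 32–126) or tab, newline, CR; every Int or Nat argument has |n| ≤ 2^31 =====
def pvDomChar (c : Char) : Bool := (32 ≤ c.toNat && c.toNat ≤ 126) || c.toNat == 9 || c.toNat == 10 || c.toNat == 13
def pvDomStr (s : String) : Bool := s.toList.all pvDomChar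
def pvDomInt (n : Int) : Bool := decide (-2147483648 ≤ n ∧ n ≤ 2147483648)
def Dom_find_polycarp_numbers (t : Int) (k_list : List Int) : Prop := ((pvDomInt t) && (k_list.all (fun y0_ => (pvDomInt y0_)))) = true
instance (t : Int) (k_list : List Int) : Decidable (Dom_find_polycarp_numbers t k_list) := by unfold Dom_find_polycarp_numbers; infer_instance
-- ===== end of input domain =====

-- B builds the list of liked numbers directly by the period-30 closed form (18 valid numbers per
-- 30) instead of A's while loop that tests every candidate integer (a different construction of
-- the same list, then the same indexing).

-- ===== PORT A =====
-- Python's `i % 3 != 0 and i % 10 != 3`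
def pvValid (i : Int) : Bool := (PySem.Int.mod i 3 != 0) && (PySem.Int.mod i 10 != 3)

-- A's while loop: `while len(arr) <= max(k_list): if valid(i): arr.append(i); i += 1`.
-- `fuel` is only a totality guard (the loop keeps one of every 3 consecutive candidates, so
-- (3*m+6).toNat steps always reach the exit condition; pvLoopA_spec below proves the bound).
def pvLoopA (m : Int) (fuel : Nat) (i : Int) (arr : List Int) : List Int :=
  match fuel with
  | 0 => arr
  | fuel + 1 =>
    if (arr.length : Int) ≤ m then
      if pvValid i then pvLoopA m fuel (i + 1) (arr ++ [i])
      else pvLoopA m fuel (i + 1) arr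
    else arr

def find_polycarp_numbers (t : Int) (k_list : List Int) : List Int :=
  -- max(k_list): ValueError on [] is excluded by Pre_
  let m := (PySem.List.max? k_list (fun x => x)).getD 0
  let arr := pvLoopA m (3 * m + 6).toNat 1 []
  -- arr[k - 1]: IndexError (k - 1 out of range) is excluded by Pre_
  k_list.map (fun k => PySem.List.pyGetD arr (k - 1) 0)

-- ===== PORT B =====
-- the 18 liked numbers in 1..30
def pvTable : List Int := [1, 2, 4, 5, 7, 8, 10, 11, 14, 16, 17, 19, 20, 22, 25, 26, 28, 29]

def find_polycarp_numbers_alt (t : Int) (k_list : List Int) : List Int :=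
  -- n = max(k_list) + 1: ValueError on [] is excluded by Pre_
  let n := (PySem.List.max? k_list (fun x => x)).getD 0 + 1
  let arr := (PySem.List.pyRange 0 n 1).map (fun j =>
    30 * PySem.Int.floordiv j 18 + PySem.List.pyGetD pvTable (PySem.Int.mod j 18) 0)
  -- arr[k - 1]: IndexError is excluded by Pre_
  k_list.map (fun k => PySem.List.pyGetD arr (k - 1) 0)

-- ===== PRECONDITION & SPEC =====
-- Pre_ excludes exactly the inputs on which both Pythons raise: the empty list (ValueError from
-- max) and lists where some k < -max(k_list) (IndexError); '∃ j, 0 ≤ k + j' says k ≥ -max(k_list).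
def Pre_find_polycarp_numbers (t : Int) (k_list : List Int) : Prop :=
  k_list ≠ [] ∧ ∀ k ∈ k_list, ∃ j ∈ k_list, 0 ≤ k + j
instance (t : Int) (k_list : List Int) : Decidable (Pre_find_polycarp_numbers t k_list) := by
  unfold Pre_find_polycarp_numbers; infer_instance

def pvWitness_find_polycarp_numbers : Int × List Int := (0, [1])

def Spec_find_polycarp_numbers (t : Int) (k_list : List Int) (out : List Int) : Prop :=
  out = find_polycarp_numbers_alt t k_list
instance (t : Int) (k_list : List Int) (out : List Int) :
    Decidable (Spec_find_polycarp_numbers t k_list out) := by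
  unfold Spec_find_polycarp_numbers; infer_instance

-- ===== CLAIM (what is proved, stated in full; the proofs are below) =====
def Claim_equal_find_polycarp_numbers : Prop := ∀ (t : Int) (k_list : List Int), Dom_find_polycarp_numbers t k_list → Pre_find_polycarp_numbers t k_list → Spec_find_polycarp_numbers t k_list (find_polycarp_numbers t k_list)

-- ===== LEMMAS AND PROOFS =====

-- the list A's loop has built after considering candidates 1..n (loop invariant)
def pvF (n : Nat) : List Int := ((List.range n).map (fun j : Nat => 1 + (j : Int))).filter pvValid

lemma pvValid_iff (x : Int) : pvValid x = true ↔ (x % 3 ≠ 0 ∧ x % 10 ≠ 3) := by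
  simp [pvValid, PySem.Int.mod_eq_emod_of_pos (show (0:Int) < 3 by norm_num),
        PySem.Int.mod_eq_emod_of_pos (show (0:Int) < 10 by norm_num)]

lemma pvF_succ (n : Nat) :
    pvF (n + 1) = pvF n ++ (if pvValid (1 + (n : Int)) then [1 + (n : Int)] else []) := by
  simp only [pvF, List.range_succ, List.map_append, List.filter_append, List.map_cons,
    List.map_nil, List.filter_cons, List.filter_nil]

lemma pvF_len_succ (n : Nat) :
    (pvF (n + 1)).length = (pvF n).length + (if pvValid (1 + (n : Int)) then 1 else 0) := by
  rw [pvF_succ]; split <;> simp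

lemma pvValid3 (a : Int) : pvValid a = true ∨ pvValid (a + 1) = true ∨ pvValid (a + 2) = true := by
  simp only [pvValid_iff]; omega

-- among any 3 consecutive candidates one is kept, so the kept list has length ≥ n/3 - 1
lemma pvF_lb (n : Nat) : (n : Int) ≤ 3 * ((pvF n).length : Int) + 2 := by
  induction n using Nat.strong_induction_on with
  | _ n ih =>
    by_cases h : n < 3
    · have : 0 ≤ ((pvF n).length : Int) := by positivity
      omega
    · obtain ⟨m, rfl⟩ : ∃ m, n = m + 3 := ⟨n - 3, by omega⟩
      have ihm := ih m (by omega)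
      have l1 := pvF_len_succ m
      have l2 := pvF_len_succ (m + 1)
      have l3 := pvF_len_succ (m + 2)
      have e2 : (1 : Int) + ((m : Nat) + 1 : Nat) = (1 + (m : Int)) + 1 := by push_cast; ring
      have e3 : (1 : Int) + ((m : Nat) + 2 : Nat) = (1 + (m : Int)) + 2 := by push_cast; ring
      rw [e2] at l2
      rw [e3] at l3
      have e12 : m + 1 + 1 = m + 2 := by omega
      rw [e12] at l2
      have eg : m + 3 = m + 2 + 1 := by omega
      rw [eg]
      rcases pvValid3 (1 + (m : Int)) with hv | hv | hv <;>
        split_ifs at l1 l2 l3 <;> omega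

-- B's closed form at 0-based rank j (Nat form)
def pvG (j : Nat) : Int := 30 * ((j / 18 : Nat) : Int) + pvTable.getD (j % 18) 0

lemma pvLink (j : Nat) :
    30 * PySem.Int.floordiv (j : Int) 18 + PySem.List.pyGetD pvTable (PySem.Int.mod (j : Int) 18) 0
      = pvG j := by
  have hm : PySem.Int.mod (j : Int) 18 = ((j % 18 : Nat) : Int) := by
    rw [PySem.Int.mod_eq_emod_of_pos (by norm_num)]; omega
  have hd : PySem.Int.floordiv (j : Int) 18 = ((j / 18 : Nat) : Int) := by
    rw [PySem.Int.floordiv_eq_ediv_of_pos (by norm_num)]; omega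
  rw [hm, hd, PySem.List.pyGetD_natCast, pvG]

lemma pvValid_add_thirty (x : Int) (q : Nat) : pvValid (x + 30 * q) = pvValid x := by
  have h3 : (x + 30 * (q : Int)) % 3 = x % 3 := by omega
  have h10 : (x + 30 * (q : Int)) % 10 = x % 10 := by omega
  simp [pvValid, PySem.Int.mod_eq_emod_of_pos (show (0:Int) < 3 by norm_num),
        PySem.Int.mod_eq_emod_of_pos (show (0:Int) < 10 by norm_num), h3, h10]

lemma pvF_add (n c : Nat) :
    pvF (n + c) = pvF n ++ ((List.range c).map (fun j : Nat => 1 + ((n : Int) + (j : Int)))).filter pvValid := by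
  unfold pvF
  rw [List.range_add, List.map_append, List.filter_append, List.map_map]
  congr 2

lemma pvF_thirty : pvF 30 = pvTable := by decide

lemma pvBlock_eq (q : Nat) :
    ((List.range 30).map (fun j : Nat => 1 + (((30 * q : Nat) : Int) + (j : Int)))).filter pvValid
      = pvTable.map (fun x => x + 30 * (q : Int)) := by
  have hf : (fun j : Nat => 1 + (((30 * q : Nat) : Int) + (j : Int)))
      = (fun x : Int => x + 30 * (q : Int)) ∘ (fun j : Nat => 1 + (j : Int)) := by
    funext j; simp [Function.comp]; push_cast; ring
  have hp : pvValid ∘ (fun x : Int => x + 30 * (q : Int)) = pvValid := by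
    funext x; simp [Function.comp, pvValid_add_thirty]
  rw [hf, ← List.map_map, List.filter_map, hp]
  exact congrArg (List.map _) pvF_thirty

lemma pvG_block (q j : Nat) (hj : j < 18) : pvG (18 * q + j) = pvTable.getD j 0 + 30 * (q : Int) := by
  have h1 : (18 * q + j) / 18 = q := by omega
  have h2 : (18 * q + j) % 18 = j := by omega
  rw [pvG, h1, h2]; ring

lemma pvF_thirty_mul (q : Nat) : pvF (30 * q) = (List.range (18 * q)).map pvG := by
  induction q with
  | zero => simp [pvF]
  | succ q ih =>
    have h30 : 30 * (q + 1) = 30 * q + 30 := by ring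
    have h18 : 18 * (q + 1) = 18 * q + 18 := by ring
    rw [h30, pvF_add, ih, pvBlock_eq, h18, List.range_add, List.map_append, List.map_map]
    congr 1
    have hc : ∀ j ∈ List.range 18, (pvG ∘ (fun x => 18 * q + x)) j
        = pvTable.getD j 0 + 30 * (q : Int) := by
      intro j hj
      exact pvG_block q j (List.mem_range.mp hj)
    rw [List.map_congr_left hc]
    simp [pvTable, List.range_succ]

lemma pvF_getElem (N j : Nat) (h : j < (pvF N).length) : (pvF N)[j] = pvG j := by
  have h1 : 30 * N = N + 29 * N := by ring
  have e30 : pvF (30 * N) = pvF N ++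
      ((List.range (29 * N)).map (fun j : Nat => 1 + ((N : Int) + (j : Int)))).filter pvValid := by
    rw [h1, pvF_add]
  have hlen : (pvF N).length ≤ N := le_trans (List.length_filter_le _ _) (by simp)
  have hj30 : j < (pvF (30 * N)).length := by
    rw [e30]; simp only [List.length_append]; omega
  have h2 : (pvF (30 * N))[j]'hj30 = (pvF N)[j]'h := by
    simp only [e30]
    exact List.getElem_append_left h
  have h3 : (pvF (30 * N))[j]'hj30 = pvG j := by
    rw [List.getElem_of_eq (pvF_thirty_mul N)]
    simp
  rw [← h2, h3]

lemma pvLoopA_spec (m : Int) (fuel : Nat) (i : Int) (arr : List Int) (hi : 1 ≤ i)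
    (harr : arr = pvF (i - 1).toNat) (hfuel : (3 * m + 6 - i).toNat ≤ fuel) :
    (arr.length : Int) ≤ m + 1 →
    ∃ N : Nat, pvLoopA m fuel i arr = pvF N ∧
      ((pvF N).length : Int) = (if (arr.length : Int) ≤ m then m + 1 else (arr.length : Int)) := by
  induction fuel generalizing i arr with
  | zero =>
    intro _
    have hlb := pvF_lb (i - 1).toNat
    rw [← harr] at hlb
    have hc : (((i - 1).toNat : Nat) : Int) = i - 1 := by omega
    rw [hc] at hlb
    by_cases h : (arr.length : Int) ≤ m
    · exfalso; omega
    · exact ⟨(i - 1).toNat, harr, by rw [if_neg h, ← harr]⟩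
  | succ fuel ih =>
    intro hlen
    by_cases h : (arr.length : Int) ≤ m
    · by_cases hv : pvValid i
      · rw [pvLoopA, if_pos h, if_pos hv]
        have harr' : arr ++ [i] = pvF (i + 1 - 1).toNat := by
          have hs : (i + 1 - 1).toNat = (i - 1).toNat + 1 := by omega
          have h1 : 1 + (((i - 1).toNat : Nat) : Int) = i := by omega
          rw [harr, hs, pvF_succ, h1, if_pos hv]
        obtain ⟨N, hN, hL⟩ := ih (i + 1) (arr ++ [i]) (by omega) harr' (by omega)
          (by simp only [List.length_append, List.length_cons, List.length_nil]; push_cast; omega)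
        refine ⟨N, hN, ?_⟩
        rw [if_pos h]
        simp only [List.length_append, List.length_cons, List.length_nil] at hL
        split at hL <;> push_cast at hL ⊢ <;> omega
      · rw [pvLoopA, if_pos h, if_neg hv]
        have harr' : arr = pvF (i + 1 - 1).toNat := by
          have hs : (i + 1 - 1).toNat = (i - 1).toNat + 1 := by omega
          have h1 : 1 + (((i - 1).toNat : Nat) : Int) = i := by omega
          rw [harr, hs, pvF_succ, h1, if_neg hv, List.append_nil]
        obtain ⟨N, hN, hL⟩ := ih (i + 1) arr (by omega) harr' (by omega) (by omega)
        refine ⟨N, hN, ?_⟩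
        rw [if_pos h]
        split at hL <;> omega
    · rw [pvLoopA, if_neg h]
      exact ⟨(i - 1).toNat, harr, by rw [if_neg h, ← harr]⟩

-- ===== VERDICT (by name: the statement is the Claim_ definition above) =====
theorem find_polycarp_numbers_spec : Claim_equal_find_polycarp_numbers := by
  intro t k_list _ hpre
  obtain ⟨hne, hall⟩ := hpre
  obtain ⟨m0, hm0⟩ : ∃ m0, PySem.List.max? k_list (fun x => x) = some m0 := by
    cases hmx : PySem.List.max? k_list (fun x => x) with
    | none => exact absurd ((PySem.List.max?_eq_none_iff _ _).mp hmx) hne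
    | some m0 => exact ⟨m0, rfl⟩
  have hmax : ∀ y ∈ k_list, y ≤ m0 := PySem.List.max?_isMax hm0
  have hm0nn : 0 ≤ m0 := by
    obtain ⟨j, hj, hj0⟩ := hall m0 (PySem.List.max?_mem hm0)
    have := hmax j hj
    omega
  show find_polycarp_numbers t k_list = find_polycarp_numbers_alt t k_list
  simp only [find_polycarp_numbers, find_polycarp_numbers_alt, hm0, Option.getD_some]
  obtain ⟨N, hN, hL⟩ := pvLoopA_spec m0 (3 * m0 + 6).toNat 1 [] (by norm_num) (by simp [pvF])
    (by omega) (by simp only [List.length_nil]; omega)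
  rw [hN]
  rw [if_pos (by simp only [List.length_nil]; omega)] at hL
  -- A's materialised list equals B's closed-form list, entry by entry
  have harr : pvF N = (PySem.List.pyRange 0 (m0 + 1) 1).map (fun j =>
      30 * PySem.Int.floordiv j 18 + PySem.List.pyGetD pvTable (PySem.Int.mod j 18) 0) := by
    rw [PySem.List.pyRange_one, List.map_map]
    apply List.ext_getElem
    · simp only [List.length_map, List.length_range]
      omega
    · intro j hj hj'
      rw [pvF_getElem N j hj]
      simp only [List.getElem_map, List.getElem_range, Function.comp]
      rw [zero_add, pvLink j]
  rw [harr]
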